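-- pv_equiv track=rewrite | github.com/StoyanDimitrov0016/audiofier-tts | audio-generator/src/text_processing.py | pack_chunks
-- ===== SOURCE A (Python) =====
-- def pack_chunks(chunks: list[str], max_chars: int = 1200) -> list[str]:
--     packed: list[str] = []
--     current: str | None = None
--
--     for chunk in chunks:
--         chunk = chunk.strip()
--         if not chunk:
--             continue
--
--         if current is None:
--             current = chunk
--             continue
--
--         combined = f"{current}\n\n{chunk}"
--         if len(combined) <= max_chars:
--             current = combined
--         else:
--             packed.append(current)
--             current = chunk
--
--     if current is not None:
--         packed.append(current)
--
--     return packed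
-- ===== SOURCE B (Python) =====
-- def pack_chunks(chunks: list[str], max_chars: int = 1200) -> list[str]:
--     cleaned = [c.strip() for c in chunks if c.strip()]
--     groups: list[list[str]] = []
--     rest = cleaned
--     while rest:
--         total = len(rest[0])
--         k = 1
--         while k < len(rest) and total + 2 + len(rest[k]) <= max_chars:
--             total += 2 + len(rest[k])
--             k += 1
--         groups.append(rest[:k])
--         rest = rest[k:]
--     return ["\n\n".join(g) for g in groups]
-- ===== Notes on version B (the rewrite author's own statement) =====
-- stated objective: alternative
-- what changed: B replaces A's single fold with a flush/append state machine over a growing concatenated string by a staged decomposition: a cleaning pass, then an outer loop that finds each group boundary with an inner prefix-length scan and slices the cleaned list into groups, then a final pass joining each group once.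
import Mathlib
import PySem

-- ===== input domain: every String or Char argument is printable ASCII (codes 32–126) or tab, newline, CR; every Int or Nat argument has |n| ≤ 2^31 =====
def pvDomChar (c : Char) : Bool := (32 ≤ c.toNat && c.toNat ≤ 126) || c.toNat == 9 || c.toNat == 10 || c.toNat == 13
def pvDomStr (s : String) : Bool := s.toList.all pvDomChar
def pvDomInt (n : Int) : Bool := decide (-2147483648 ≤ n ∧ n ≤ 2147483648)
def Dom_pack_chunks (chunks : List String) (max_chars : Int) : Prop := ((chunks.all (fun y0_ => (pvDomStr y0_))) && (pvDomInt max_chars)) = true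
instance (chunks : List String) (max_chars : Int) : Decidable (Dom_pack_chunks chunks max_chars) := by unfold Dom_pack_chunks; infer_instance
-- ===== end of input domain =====

-- B replaces A's single fold with a flush/append state machine by a staged decomposition:
-- clean, then repeatedly find the next group boundary by a prefix-length scan and slice the
-- list into groups, joining each group once at the end (objective: alternative).

-- ===== PORT A =====
-- one iteration of A's loop; state = (packed, current); strings handled as List Char via PySem.Chars (exact)
def packAStep (max_chars : Int) (st : List String × Option (List Char)) (chunk : String) :
    List String × Option (List Char) :=
  let c := PySem.Chars.strip chunk.toList
  if c = [] then st
  else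
    match st.2 with
    | none => (st.1, some c)
    | some cur =>
      let combined := cur ++ ['\n', '\n'] ++ c
      if (combined.length : Int) ≤ max_chars then (st.1, some combined)
      else (st.1 ++ [String.ofList cur], some c)

def pack_chunks (chunks : List String) (max_chars : Int) : List String :=
  let st := chunks.foldl (packAStep max_chars) ([], none)
  match st.2 with
  | none => st.1
  | some cur => st.1 ++ [String.ofList cur]

-- ===== PORT B =====
-- B's inner while loop: starting after the first chunk of a group (running total `total`),
-- take further chunks while they fit; returns (rest[1:k], rest[k:]) of the scanned tail
def splitGroupAux (max_chars : Int) (total : Int) : List (List Char) → List (List Char) × List (List Char)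
  | [] => ([], [])
  | c :: rest =>
    if total + 2 + (c.length : Int) ≤ max_chars then
      let p := splitGroupAux max_chars (total + 2 + (c.length : Int)) rest
      (c :: p.1, p.2)
    else ([], c :: rest)

theorem splitGroupAux_snd_length (max_chars total : Int) (l : List (List Char)) :
    (splitGroupAux max_chars total l).2.length ≤ l.length := by
  induction l generalizing total with
  | nil => simp [splitGroupAux]
  | cons c rest ih =>
    unfold splitGroupAux
    split
    · exact le_trans (ih _) (Nat.le_succ _)
    · simp

-- B's outer while loop: slice the cleaned list into groups
def buildGroups (max_chars : Int) : List (List Char) → List (List (List Char))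
  | [] => []
  | c :: rest =>
    let p := splitGroupAux max_chars (c.length : Int) rest
    (c :: p.1) :: buildGroups max_chars p.2
termination_by l => l.length
decreasing_by
  simpa using Nat.lt_succ_of_le (splitGroupAux_snd_length max_chars (c.length : Int) rest)

def pack_chunks_alt (chunks : List String) (max_chars : Int) : List String :=
  let cleaned := ((chunks.map (fun c => PySem.Chars.strip c.toList)).filter (fun c => c ≠ []))
  (buildGroups max_chars cleaned).map (fun g => String.ofList (PySem.Chars.join ['\n', '\n'] g))

-- ===== PRECONDITION & SPEC =====
def Spec_pack_chunks (chunks : List String) (max_chars : Int) (out : List String) : Prop := out = pack_chunks_alt chunks max_chars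
instance (chunks : List String) (max_chars : Int) (out : List String) : Decidable (Spec_pack_chunks chunks max_chars out) := by unfold Spec_pack_chunks; infer_instance

-- ===== CLAIM (what is proved, stated in full; the proofs are below) =====
def Claim_equal_pack_chunks : Prop := ∀ (chunks : List String) (max_chars : Int), Dom_pack_chunks chunks max_chars → Spec_pack_chunks chunks max_chars (pack_chunks chunks max_chars)

-- ===== LEMMAS AND PROOFS =====

theorem dropWhile_idem {α : Type} (p : α → Bool) (l : List α) :
    List.dropWhile p (List.dropWhile p l) = List.dropWhile p l := by
  induction l with
  | nil => simp
  | cons a l ih =>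
    by_cases h : p a = true
    · simp [h, ih]
    · simp [h]

theorem dropWhile_prefix_fix {α : Type} (p : α → Bool) {x y : List α} (hy : y <+: x)
    (h : List.dropWhile p x = x) : List.dropWhile p y = y := by
  cases y with
  | nil => simp
  | cons a t =>
    cases x with
    | nil => exact absurd (List.prefix_nil.mp hy) (by simp)
    | cons b u =>
      obtain ⟨hab, _⟩ := List.cons_prefix_cons.mp hy
      have hpb : p b = false := by
        by_contra hp
        rw [Bool.not_eq_false] at hp
        rw [List.dropWhile_cons, if_pos hp] at h
        have := List.length_dropWhile_le p u
        rw [h] at this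
        simp at this
      subst hab
      rw [List.dropWhile_cons, if_neg (by simp [hpb])]

theorem strip_idem (s : List Char) :
    PySem.Chars.strip (PySem.Chars.strip s) = PySem.Chars.strip s := by
  unfold PySem.Chars.strip PySem.Chars.rstrip PySem.Chars.lstrip
  set p := PySem.Chars.isspace with hp
  set y := List.dropWhile p s with hy
  have h1 : List.dropWhile p y = y := by rw [hy]; exact dropWhile_idem p s
  have hpre : (List.dropWhile p y.reverse).reverse <+: y := by
    have := List.reverse_prefix.mpr (List.dropWhile_suffix (l := y.reverse) p)
    simpa using this
  have h2 : List.dropWhile p (List.dropWhile p y.reverse).reverse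
      = (List.dropWhile p y.reverse).reverse := dropWhile_prefix_fix p hpre h1
  rw [h2, List.reverse_reverse, dropWhile_idem]

-- reduce one A step on an already-stripped nonempty chunk
theorem packAStep_eq_none (max_chars : Int) (pa : List String)
    (c : List Char) (hc : c ≠ []) (hcs : PySem.Chars.strip c = c) :
    packAStep max_chars (pa, none) (String.ofList c) = (pa, some c) := by
  simp [packAStep, hcs, hc]

theorem packAStep_eq_some (max_chars : Int) (pa : List String) (cur : List Char)
    (c : List Char) (hc : c ≠ []) (hcs : PySem.Chars.strip c = c) :
    packAStep max_chars (pa, some cur) (String.ofList c) =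
      (if (cur.length : Int) + 2 + (c.length : Int) ≤ max_chars then
        (pa, some (cur ++ ['\n', '\n'] ++ c))
      else (pa ++ [String.ofList cur], some c)) := by
  have hlen : ∀ m : Int, (((cur ++ ['\n', '\n'] ++ c).length : Int) ≤ m)
      = ((cur.length : Int) + 2 + (c.length : Int) ≤ m) := by
    intro m
    have : ((cur ++ ['\n', '\n'] ++ c).length : Int)
        = (cur.length : Int) + 2 + (c.length : Int) := by
      simp [List.length_append]; ring
    rw [this]
  simp only [packAStep, String.toList_ofList, hcs]
  rw [if_neg hc]
  simp only [hlen]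

-- A's fold over the raw chunks equals an A-style fold over the cleaned list
theorem foldA_cleaned (max_chars : Int) (chunks : List String) (a : List String × Option (List Char)) :
    chunks.foldl (packAStep max_chars) a =
      (((chunks.map (fun c => PySem.Chars.strip c.toList)).filter (fun c => c ≠ [])).foldl
        (fun st c => packAStep max_chars st (String.ofList c)) a) := by
  induction chunks generalizing a with
  | nil => rfl
  | cons s chunks ih =>
    by_cases h : PySem.Chars.strip s.toList = []
    · simp only [List.foldl_cons, List.map_cons, List.filter_cons]
      rw [show packAStep max_chars a s = a by simp [packAStep, h]]
      simp [h, ih]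
    · have heq : packAStep max_chars a s
          = packAStep max_chars a (String.ofList (PySem.Chars.strip s.toList)) := by
        simp [packAStep, String.toList_ofList, strip_idem]
      simp only [List.foldl_cons, List.map_cons, List.filter_cons]
      rw [heq]
      simp [h, ih]

-- A's running concatenation, as a fold over the pieces B keeps separate
def catJoin (cur : List Char) (gs : List (List Char)) : List Char :=
  gs.foldl (fun a g => a ++ ['\n', '\n'] ++ g) cur

theorem catJoin_append (x s : List Char) (gs : List (List Char)) :
    catJoin (x ++ s) gs = x ++ catJoin s gs := by
  induction gs generalizing s with
  | nil => rfl
  | cons g gs ih =>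
    simp only [catJoin, List.foldl_cons] at *
    rw [show x ++ s ++ ['\n', '\n'] ++ g = x ++ (s ++ ['\n', '\n'] ++ g) by simp, ih]

theorem join_eq_catJoin (c : List Char) (gs : List (List Char)) :
    PySem.Chars.join ['\n', '\n'] (c :: gs) = catJoin c gs := by
  induction gs generalizing c with
  | nil => simp [PySem.Chars.join_singleton, catJoin]
  | cons g gs ih =>
    rw [PySem.Chars.join_cons_cons, ih g]
    have h : catJoin c (g :: gs) = catJoin ((c ++ ['\n', '\n']) ++ g) gs := by
      simp [catJoin]
    rw [h, catJoin_append]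

-- unfolding equations for B's two loops
theorem splitGroupAux_cons (m t : Int) (c : List Char) (rest : List (List Char)) :
    splitGroupAux m t (c :: rest) =
      if t + 2 + (c.length : Int) ≤ m then
        (c :: (splitGroupAux m (t + 2 + (c.length : Int)) rest).1,
          (splitGroupAux m (t + 2 + (c.length : Int)) rest).2)
      else ([], c :: rest) := rfl

theorem buildGroups_nil (m : Int) : buildGroups m [] = [] := by
  conv_lhs => unfold buildGroups

theorem buildGroups_cons (m : Int) (c : List Char) (rest : List (List Char)) :
    buildGroups m (c :: rest) =
      (c :: (splitGroupAux m (c.length : Int) rest).1) ::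
        buildGroups m (splitGroupAux m (c.length : Int) rest).2 := by
  conv_lhs => unfold buildGroups

-- A's finishing step
def finishA (st : List String × Option (List Char)) : List String :=
  match st.2 with
  | none => st.1
  | some cur => st.1 ++ [String.ofList cur]

-- core invariant: the A-fold from (pa, some cur) over l produces pa, then the current group
-- (cur extended by the pieces splitGroupAux takes), then the groups of what remains
theorem foldA_groups (max_chars : Int) (l : List (List Char))
    (hl : ∀ c ∈ l, c ≠ [] ∧ PySem.Chars.strip c = c) (cur : List Char) (pa : List String) :
    finishA (l.foldl (fun st c => packAStep max_chars st (String.ofList c)) (pa, some cur)) =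
      pa ++ String.ofList (catJoin cur (splitGroupAux max_chars (cur.length : Int) l).1) ::
        (buildGroups max_chars (splitGroupAux max_chars (cur.length : Int) l).2).map
          (fun g => String.ofList (PySem.Chars.join ['\n', '\n'] g)) := by
  induction l generalizing cur pa with
  | nil => simp [finishA, splitGroupAux, catJoin, buildGroups_nil]
  | cons c rest ih =>
    obtain ⟨hc, hcs⟩ := hl c List.mem_cons_self
    have hl' : ∀ x ∈ rest, x ≠ [] ∧ PySem.Chars.strip x = x :=
      fun x hx => hl x (List.mem_cons_of_mem _ hx)
    simp only [List.foldl_cons]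
    rw [packAStep_eq_some max_chars pa cur c hc hcs]
    rw [splitGroupAux_cons]
    by_cases hle : (cur.length : Int) + 2 + (c.length : Int) ≤ max_chars
    · rw [if_pos hle, if_pos hle]
      rw [ih hl' (cur ++ ['\n', '\n'] ++ c) pa]
      have hlen : ((cur ++ ['\n', '\n'] ++ c).length : Int)
          = (cur.length : Int) + 2 + (c.length : Int) := by
        simp [List.length_append]; ring
      rw [hlen]
      simp [catJoin]
    · rw [if_neg hle, if_neg hle]
      rw [ih hl' c (pa ++ [String.ofList cur])]
      rw [buildGroups_cons]
      simp [catJoin, join_eq_catJoin]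

-- ===== VERDICT (by name: the statement is the Claim_ definition above) =====
theorem pack_chunks_spec : Claim_equal_pack_chunks := by
  intro chunks max_chars _
  unfold Spec_pack_chunks pack_chunks pack_chunks_alt
  rw [foldA_cleaned]
  have hcl : ∀ c ∈ ((chunks.map (fun c => PySem.Chars.strip c.toList)).filter (fun c => c ≠ [])),
      c ≠ [] ∧ PySem.Chars.strip c = c := by
    intro c hcmem
    simp only [List.mem_filter, List.mem_map] at hcmem
    obtain ⟨⟨s, _, hs⟩, hne⟩ := hcmem
    exact ⟨by simpa using hne, by rw [← hs, strip_idem]⟩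
  cases hcase : ((chunks.map (fun c => PySem.Chars.strip c.toList)).filter (fun c => c ≠ [])) with
  | nil => simp [buildGroups_nil]
  | cons c rest =>
    have h1 := hcl; rw [hcase] at h1
    obtain ⟨hc, hcs⟩ := h1 c List.mem_cons_self
    have hmain := foldA_groups max_chars rest (fun x hx => h1 x (List.mem_cons_of_mem _ hx)) c []
    simp only [List.foldl_cons]
    rw [packAStep_eq_none max_chars [] c hc hcs]
    show finishA _ = _
    rw [hmain, buildGroups_cons]
    simp [join_eq_catJoin]
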